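-- pv_equiv track=rewrite | github.com/zaidnere/sqli-project | backend/app/preprocessing/normalizer_backup_v17b.py | _detect_safe_numeric_assignment
-- ===== SOURCE A (Python) =====
-- def is_identifier(token: str) -> bool:
--     return token.isidentifier()
--
-- _NUMERIC_SAFE_FUNCS = {"int", "min", "max", "abs", "len", "round", "Math"}
--
-- def _detect_safe_numeric_assignment(
--     tokens: list[str], eq_idx: int, known_safe_numeric: set[str]
-- ) -> bool:
--     """
--     Detect assignment whose RHS is composed exclusively of numeric-safe parts:
--       - calls to int()/min()/max()/abs()/len()/round()
--       - already-known-safe numeric vars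
--       - integer/float literals
--       - arithmetic operators + - * / %
--       - parentheses
--
--     Examples that PASS:
--       safe_page = int(page)
--       safe_page_size = min(100, max(1, int(page_size)))
--       offset = (safe_page - 1) * safe_page_size
--
--     Examples that FAIL:
--       x = some_string + page
--       x = page                       (raw — int() not applied)
--       x = "literal"
--     """
--     n = len(tokens)
--     i = eq_idx + 1
--     depth = 0
--     has_numeric_source = False
--     only_safe = True
--     stmt_boundary_kw = {
--         "def", "class", "return", "if", "elif", "else", "for", "while",
--         "try", "except", "finally", "with", "import", "from", "raise",
--         "yield", "pass", "break", "continue",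
--     }
--     arithmetic_ops = {"+", "-", "*", "/", "%", "//"}
--     structural = {"(", ")", "[", "]", "{", "}", ","}
--
--     # Helper: is identifier at idx the argument of a numeric-safe wrapper?
--     def _is_numeric_wrapped_arg(idx: int) -> bool:
--         j = idx - 1
--         d = 0
--         while j >= eq_idx:
--             tj = tokens[j]
--             if tj in (")", "]", "}"):
--                 d += 1
--             elif tj in ("(", "[", "{"):
--                 if d == 0:
--                     if j - 1 >= 0 and tokens[j - 1] in _NUMERIC_SAFE_FUNCS:
--                         return True
--                     return False
--                 d -= 1
--             j -= 1
--         return False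
--
--     while i < n:
--         t = tokens[i]
--         if t in ("(", "[", "{"):
--             depth += 1
--         elif t in (")", "]", "}"):
--             depth -= 1
--             if depth < 0:
--                 break
--         if depth == 0:
--             if t in (";", "\n"):
--                 break
--             if t == "=" and i > eq_idx + 1:
--                 prev_t = tokens[i - 1] if i - 1 >= 0 else None
--                 next_t = tokens[i + 1] if i + 1 < n else None
--                 if prev_t not in ("=", "!", "<", ">", "+", "-", "*", "/", "%") and next_t != "=":
--                     break
--             if t in stmt_boundary_kw:
--                 break
--
--         if t in _NUMERIC_SAFE_FUNCS and i + 1 < n and tokens[i + 1] == "(":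
--             has_numeric_source = True
--         elif t in known_safe_numeric:
--             has_numeric_source = True
--         elif t.replace(".", "", 1).isdigit():
--             pass  # numeric literal
--         elif t in arithmetic_ops or t in structural:
--             pass
--         elif t in ("Number", "parseInt", "parseFloat"):  # JS variants
--             has_numeric_source = True
--         elif is_identifier(t):
--             # Bare identifier — must be inside a numeric-safe-func call
--             if not _is_numeric_wrapped_arg(i):
--                 only_safe = False
--         elif t.startswith(('"', "'", "`")):
--             only_safe = False
--         i += 1
--     return has_numeric_source and only_safe
-- ===== SOURCE B (Python) =====
-- _NUMERIC_SAFE_FUNCS = {"int", "min", "max", "abs", "len", "round", "Math"}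
--
--
-- def is_identifier(token: str) -> bool:
--     return token.isidentifier()
--
--
-- def _detect_safe_numeric_assignment(
--     tokens: list[str], eq_idx: int, known_safe_numeric: set[str]
-- ) -> bool:
--     # Single forward pass. Instead of re-scanning backwards for every bare
--     # identifier (A's quadratic helper), keep a stack with one boolean per
--     # currently-open bracket: whether that bracket's call is a numeric-safe
--     # function call.  A bare identifier is acceptable iff the flag of the
--     # innermost open bracket (or of the bracket sitting at eq_idx itself)
--     # is True.
--     n = len(tokens)
--     i = eq_idx + 1
--     if not (i < n):
--         return False
--
--     stmt_boundary_kw = {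
--         "def", "class", "return", "if", "elif", "else", "for", "while",
--         "try", "except", "finally", "with", "import", "from", "raise",
--         "yield", "pass", "break", "continue",
--     }
--     arithmetic_ops = {"+", "-", "*", "/", "%", "//"}
--     structural = {"(", ")", "[", "]", "{", "}", ","}
--     opens = ("(", "[", "{")
--     closes = (")", "]", "}")
--
--     # flag for the bracket just below the scanned region (the token at eq_idx)
--     base = tokens[eq_idx] in opens and eq_idx - 1 >= 0 \
--         and tokens[eq_idx - 1] in _NUMERIC_SAFE_FUNCS
--
--     stack = []  # one bool per open bracket met in the region, innermost last
--     has_numeric_source = False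
--     only_safe = True
--
--     while i < n:
--         t = tokens[i]
--         if t in opens:
--             stack.append(i - 1 >= 0 and tokens[i - 1] in _NUMERIC_SAFE_FUNCS)
--         elif t in closes:
--             if not stack:
--                 break
--             stack.pop()
--         if not stack:
--             if t in (";", "\n"):
--                 break
--             if t == "=" and i > eq_idx + 1:
--                 prev_t = tokens[i - 1] if i - 1 >= 0 else None
--                 next_t = tokens[i + 1] if i + 1 < n else None
--                 if prev_t not in ("=", "!", "<", ">", "+", "-", "*", "/", "%") and next_t != "=":
--                     break
--             if t in stmt_boundary_kw:
--                 break
--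
--         if t in _NUMERIC_SAFE_FUNCS and i + 1 < n and tokens[i + 1] == "(":
--             has_numeric_source = True
--         elif t in known_safe_numeric:
--             has_numeric_source = True
--         elif t.replace(".", "", 1).isdigit():
--             pass
--         elif t in arithmetic_ops or t in structural:
--             pass
--         elif t in ("Number", "parseInt", "parseFloat"):
--             has_numeric_source = True
--         elif is_identifier(t):
--             if not (stack[-1] if stack else base):
--                 only_safe = False
--         elif t.startswith(('"', "'", "`")):
--             only_safe = False
--         i += 1
--     return has_numeric_source and only_safe
-- ===== Notes on version B (the rewrite author's own statement) =====
-- stated objective: faster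
-- what changed: A re-scans the tokens backwards (helper _is_numeric_wrapped_arg) for every bare identifier to find its enclosing bracket's callee, which is quadratic; B makes a single forward pass keeping a stack with one boolean per open bracket (whether it follows a numeric-safe function), so an identifier check is an O(1) stack-top lookup.
-- outside the precondition, e.g. on _detect_safe_numeric_assignment(['5'], -2, set()): A returns False, B raises IndexError
import Mathlib
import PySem

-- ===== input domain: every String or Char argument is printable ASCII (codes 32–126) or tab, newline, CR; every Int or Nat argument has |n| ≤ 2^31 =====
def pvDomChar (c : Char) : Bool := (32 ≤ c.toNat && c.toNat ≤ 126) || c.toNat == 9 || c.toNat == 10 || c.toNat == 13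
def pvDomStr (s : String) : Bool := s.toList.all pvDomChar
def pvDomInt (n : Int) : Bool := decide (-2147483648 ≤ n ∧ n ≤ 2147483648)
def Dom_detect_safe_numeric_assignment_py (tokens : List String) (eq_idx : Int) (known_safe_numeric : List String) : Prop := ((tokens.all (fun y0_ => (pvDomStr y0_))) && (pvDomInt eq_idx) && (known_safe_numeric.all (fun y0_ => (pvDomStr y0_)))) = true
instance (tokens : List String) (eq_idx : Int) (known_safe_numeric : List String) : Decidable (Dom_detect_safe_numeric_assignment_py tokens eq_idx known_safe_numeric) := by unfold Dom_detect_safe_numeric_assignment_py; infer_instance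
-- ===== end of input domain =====

-- B replaces A's per-identifier backward rescan by a single forward pass with a
-- stack of one boolean per open bracket (objective: faster, quadratic → linear).
-- Shared token-classification helpers (identical literal sets in both Pythons).

def pvGetS (tokens : List String) (i : Int) : String := (PySem.List.pyGet? tokens i).getD ""

def pvFuncs : List String := ["int", "min", "max", "abs", "len", "round", "Math"]
def pvKw : List String := ["def", "class", "return", "if", "elif", "else", "for", "while",
  "try", "except", "finally", "with", "import", "from", "raise", "yield", "pass", "break", "continue"]
def pvArith : List String := ["+", "-", "*", "/", "%", "//"]
def pvStruct : List String := ["(", ")", "[", "]", "{", "}", ","]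
def pvCmpOps : List String := ["=", "!", "<", ">", "+", "-", "*", "/", "%"]
def pvOpen (t : String) : Bool := t == "(" || t == "[" || t == "{"
def pvClose (t : String) : Bool := t == ")" || t == "]" || t == "}"

def pvRemoveFirstDot : List Char → List Char
  | [] => []
  | c :: cs => if c = '.' then cs else c :: pvRemoveFirstDot cs

-- t.replace(".", "", 1).isdigit()  (remove first '.' then isdigit; exact on the ASCII domain)
def pvNumLit (t : String) : Bool := PySem.Chars.strIsdigit (pvRemoveFirstDot t.toList)

-- str.isidentifier, ported by hand: exact on the printable-ASCII domain
-- (nonempty, first char letter or '_', rest letters/digits/'_')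
def pvIsIdent (t : String) : Bool :=
  match t.toList with
  | [] => false
  | c :: cs => (c.isAlpha || c == '_') && cs.all (fun d => d.isAlphanum || d == '_')

-- t.startswith(('"', "'", "`"))  (first character is a quote)
def pvQuote (t : String) : Bool :=
  match t.toList with
  | [] => false
  | c :: _ => c == '"' || c == '\'' || c == '`'

-- ===== PORT A =====
-- A's nested helper _is_numeric_wrapped_arg: backward scan from j down to eq_idx.
def wrapArg (tokens : List String) (eq_idx : Int) (j : Int) (d : Nat) : Bool :=
  if h : eq_idx ≤ j then
    let tj := pvGetS tokens j
    if pvClose tj then wrapArg tokens eq_idx (j - 1) (d + 1)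
    else if pvOpen tj then
      if d = 0 then decide (0 ≤ j - 1) && pvFuncs.contains (pvGetS tokens (j - 1))
      else wrapArg tokens eq_idx (j - 1) (d - 1)
    else wrapArg tokens eq_idx (j - 1) d
  else false
termination_by (j + 1 - eq_idx).toNat
decreasing_by all_goals omega

-- A's main while-loop: state (i, depth, has_numeric_source, only_safe).
def loopA (tokens : List String) (eq_idx : Int) (known : List String) (n i depth : Int)
    (has only : Bool) : Bool :=
  if h : i < n then
    let t := pvGetS tokens i
    let depth' := if pvOpen t then depth + 1 else if pvClose t then depth - 1 else depth
    if pvClose t && decide (depth' < 0) then has && only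
    else if decide (depth' = 0) && (t == ";" || t == "\n") then has && only
    else if decide (depth' = 0) && t == "=" && decide (eq_idx + 1 < i)
        && !(decide (0 ≤ i - 1) && pvCmpOps.contains (pvGetS tokens (i - 1)))
        && !(decide (i + 1 < n) && pvGetS tokens (i + 1) == "=") then has && only
    else if decide (depth' = 0) && pvKw.contains t then has && only
    else
      let res :=
        if pvFuncs.contains t && decide (i + 1 < n) && pvGetS tokens (i + 1) == "(" then (true, only)
        else if known.contains t then (true, only)
        else if pvNumLit t then (has, only)
        else if pvArith.contains t || pvStruct.contains t then (has, only)
        else if t == "Number" || t == "parseInt" || t == "parseFloat" then (true, only)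
        else if pvIsIdent t then (has, if wrapArg tokens eq_idx (i - 1) 0 then only else false)
        else if pvQuote t then (has, false)
        else (has, only)
      loopA tokens eq_idx known n (i + 1) depth' res.1 res.2
  else has && only
termination_by (n - i).toNat
decreasing_by omega

def detect_safe_numeric_assignment_py (tokens : List String) (eq_idx : Int) (known_safe_numeric : List String) : Bool :=
  loopA tokens eq_idx known_safe_numeric (tokens.length : Int) (eq_idx + 1) 0 false true

-- ===== PORT B =====
-- B's single forward pass: a stack of booleans, one per currently-open bracket
-- ("does this bracket follow a numeric-safe function?"); identifier check is the
-- stack top (or `base`, the flag of the bracket sitting at eq_idx itself).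
def loopB (tokens : List String) (eq_idx : Int) (known : List String) (n : Int) (base : Bool)
    (i : Int) (stack : List Bool) (has only : Bool) : Bool :=
  if h : i < n then
    let t := pvGetS tokens i
    if pvClose t && stack.isEmpty then has && only
    else
      let stack' :=
        if pvOpen t then (decide (0 ≤ i - 1) && pvFuncs.contains (pvGetS tokens (i - 1))) :: stack
        else if pvClose t then stack.tail
        else stack
      if stack'.isEmpty && (t == ";" || t == "\n") then has && only
      else if stack'.isEmpty && t == "=" && decide (eq_idx + 1 < i)
          && !(decide (0 ≤ i - 1) && pvCmpOps.contains (pvGetS tokens (i - 1)))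
          && !(decide (i + 1 < n) && pvGetS tokens (i + 1) == "=") then has && only
      else if stack'.isEmpty && pvKw.contains t then has && only
      else
        let res :=
          if pvFuncs.contains t && decide (i + 1 < n) && pvGetS tokens (i + 1) == "(" then (true, only)
          else if known.contains t then (true, only)
          else if pvNumLit t then (has, only)
          else if pvArith.contains t || pvStruct.contains t then (has, only)
          else if t == "Number" || t == "parseInt" || t == "parseFloat" then (true, only)
          else if pvIsIdent t then (has, if stack'.headD base then only else false)
          else if pvQuote t then (has, false)
          else (has, only)
        loopB tokens eq_idx known n base (i + 1) stack' res.1 res.2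
  else has && only
termination_by (n - i).toNat
decreasing_by omega

def detect_safe_numeric_assignment_py_alt (tokens : List String) (eq_idx : Int) (known_safe_numeric : List String) : Bool :=
  let n : Int := tokens.length
  if eq_idx + 1 < n then
    let base := pvOpen (pvGetS tokens eq_idx) && decide (0 ≤ eq_idx - 1)
        && pvFuncs.contains (pvGetS tokens (eq_idx - 1))
    loopB tokens eq_idx known_safe_numeric n base (eq_idx + 1) [] false true
  else false

-- ===== PRECONDITION & SPEC =====
-- Pre_ excludes eq_idx below -len(tokens) while the scan still runs: there A's
-- index arithmetic reaches below -len(tokens) and raises IndexError (on some of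
-- those inputs A happens to return before the bad access; B raises there too).
def Pre_detect_safe_numeric_assignment_py (tokens : List String) (eq_idx : Int) (known_safe_numeric : List String) : Prop :=
  -(tokens.length : Int) ≤ eq_idx ∨ (tokens.length : Int) - 1 ≤ eq_idx
instance (tokens : List String) (eq_idx : Int) (known_safe_numeric : List String) : Decidable (Pre_detect_safe_numeric_assignment_py tokens eq_idx known_safe_numeric) := by unfold Pre_detect_safe_numeric_assignment_py; infer_instance

def pvWitness_detect_safe_numeric_assignment_py : List String × Int × List String :=
  (["safe", "=", "int", "(", "page", ")"], 1, ["safe"])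

def Spec_detect_safe_numeric_assignment_py (tokens : List String) (eq_idx : Int) (known_safe_numeric : List String) (out : Bool) : Prop := out = detect_safe_numeric_assignment_py_alt tokens eq_idx known_safe_numeric
instance (tokens : List String) (eq_idx : Int) (known_safe_numeric : List String) (out : Bool) : Decidable (Spec_detect_safe_numeric_assignment_py tokens eq_idx known_safe_numeric out) := by unfold Spec_detect_safe_numeric_assignment_py; infer_instance

-- ===== CLAIM (what is proved, stated in full; the proofs are below) =====
def Claim_equal_detect_safe_numeric_assignment_py : Prop := ∀ (tokens : List String) (eq_idx : Int) (known_safe_numeric : List String), Dom_detect_safe_numeric_assignment_py tokens eq_idx known_safe_numeric → Pre_detect_safe_numeric_assignment_py tokens eq_idx known_safe_numeric → Spec_detect_safe_numeric_assignment_py tokens eq_idx known_safe_numeric (detect_safe_numeric_assignment_py tokens eq_idx known_safe_numeric)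

-- ===== LEMMAS AND PROOFS =====

-- The boolean list B's stack extends at the bottom: the flag of the bracket at
-- eq_idx itself (empty when tokens[eq_idx] is not an open bracket).
def pvBaseL (tokens : List String) (eq_idx : Int) : List Bool :=
  if pvOpen (pvGetS tokens eq_idx)
  then [decide (0 ≤ eq_idx - 1) && pvFuncs.contains (pvGetS tokens (eq_idx - 1))]
  else []

lemma pv_getD_append_zero (s b : List Bool) :
    (s ++ b).getD 0 false = s.headD (b.headD false) := by
  cases s <;> cases b <;> simp

lemma pv_not_open_of_close {t : String} (h : pvClose t = true) : pvOpen t = false := by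
  simp only [pvClose, Bool.or_eq_true, beq_iff_eq] at h
  rcases h with (h | h) | h <;> subst h <;> decide

lemma pv_not_ident_of_close {t : String} (h : pvClose t = true) : pvIsIdent t = false := by
  simp only [pvClose, Bool.or_eq_true, beq_iff_eq] at h
  rcases h with (h | h) | h <;> subst h <;> decide

lemma pv_not_ident_of_open {t : String} (h : pvOpen t = true) : pvIsIdent t = false := by
  simp only [pvOpen, Bool.or_eq_true, beq_iff_eq] at h
  rcases h with (h | h) | h <;> subst h <;> decide

-- Base of the invariant: the backward scan starting at eq_idx sees only the
-- token at eq_idx and answers according to pvBaseL.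
lemma pv_inv_base (tokens : List String) (eq_idx : Int) (d : Nat) :
    wrapArg tokens eq_idx eq_idx d = (pvBaseL tokens eq_idx).getD d false := by
  rw [wrapArg]
  have hstop : ∀ d' : Nat, wrapArg tokens eq_idx (eq_idx - 1) d' = false := by
    intro d'; rw [wrapArg]; simp only [dif_neg (by omega : ¬ eq_idx ≤ eq_idx - 1)]
  simp only [dif_pos (le_refl eq_idx)]
  unfold pvBaseL
  by_cases hc : pvClose (pvGetS tokens eq_idx) = true
  · simp [hc, pv_not_open_of_close hc, hstop]
  · by_cases ho : pvOpen (pvGetS tokens eq_idx) = true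
    · cases d <;> simp [hc, ho, hstop]
    · simp [hc, ho, hstop]

-- One forward step preserves the invariant relating the backward scan to the
-- stack (on a closing bracket only when the stack is nonempty — otherwise the
-- loop breaks and the invariant is no longer needed).
lemma pv_inv_step (tokens : List String) (eq_idx i : Int) (stack : List Bool)
    (hi : eq_idx + 1 ≤ i)
    (hne : pvClose (pvGetS tokens i) = true → stack ≠ [])
    (hInv : ∀ d : Nat, wrapArg tokens eq_idx (i - 1) d = (stack ++ pvBaseL tokens eq_idx).getD d false) :
    ∀ d : Nat, wrapArg tokens eq_idx i d =
      (((if pvOpen (pvGetS tokens i) then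
            (decide (0 ≤ i - 1) && pvFuncs.contains (pvGetS tokens (i - 1))) :: stack
          else if pvClose (pvGetS tokens i) then stack.tail
          else stack) ++ pvBaseL tokens eq_idx).getD d false) := by
  intro d
  rw [wrapArg]
  simp only [dif_pos (by omega : eq_idx ≤ i)]
  by_cases hc : pvClose (pvGetS tokens i) = true
  · obtain ⟨g, r, hgr⟩ : ∃ g r, stack = g :: r := by
      cases stack with
      | nil => exact absurd rfl (hne hc)
      | cons g r => exact ⟨g, r, rfl⟩
    subst hgr
    simp [hc, pv_not_open_of_close hc, hInv (d + 1)]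
  · by_cases ho : pvOpen (pvGetS tokens i) = true
    · simp only [hc, ho, if_true, Bool.false_eq_true, if_false]
      cases d with
      | zero => simp
      | succ d' => simp [hInv d']
    · simp [hc, ho, hInv d]

lemma pv_isEmpty_iff (stack : List Bool) :
    decide ((stack.length : Int) = 0) = stack.isEmpty := by
  cases stack with
  | nil => simp
  | cons a l => simp; omega

-- Main loop equivalence: A's depth counter + backward rescans ≡ B's flag stack.
set_option maxHeartbeats 2000000 in
lemma pv_loop_eq (tokens : List String) (eq_idx : Int) (known : List String) (n : Int) :
    ∀ (k : Nat) (i : Int) (stack : List Bool) (has only : Bool),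
      (n - i).toNat = k → eq_idx + 1 ≤ i →
      (∀ d : Nat, wrapArg tokens eq_idx (i - 1) d = (stack ++ pvBaseL tokens eq_idx).getD d false) →
      loopA tokens eq_idx known n i (stack.length : Int) has only
        = loopB tokens eq_idx known n ((pvBaseL tokens eq_idx).headD false) i stack has only := by
  intro k
  induction k with
  | zero =>
      intro i stack has only hk hi hInv
      have hn : ¬ i < n := by omega
      rw [loopA, loopB]; simp [hn]
  | succ k ih =>
      intro i stack has only hk hi hInv
      have hn : i < n := by omega
      rw [loopA, loopB]
      simp only [dif_pos hn]
      by_cases hc : pvClose (pvGetS tokens i) = true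
      · -- a closing bracket
        have ho := pv_not_open_of_close hc
        have hid := pv_not_ident_of_close hc
        cases stack with
        | nil =>
            -- depth goes negative: both sides break
            simp [hc, ho]
        | cons g r =>
            have hstep := pv_inv_step tokens eq_idx i (g :: r) hi (fun _ => by simp) hInv
            have hInv' : ∀ d : Nat, wrapArg tokens eq_idx (i + 1 - 1) d
                = (r ++ pvBaseL tokens eq_idx).getD d false := by
              rw [show i + 1 - 1 = i from by ring]
              intro d
              simpa [hc, ho] using hstep d
            have hdep : ((g :: r).length : Int) - 1 = (r.length : Int) := by simp
            simp only [hc, ho, hid, Bool.false_eq_true, if_false, if_true, List.isEmpty_cons,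
              Bool.and_false, List.tail_cons, hdep,
              show ¬ ((r.length : Int) < 0) from by omega, decide_false, pv_isEmpty_iff]
            split_ifs <;>
              first
                | rfl
                | exact ih (i + 1) r _ _ (by omega) (by omega) hInv'
      · by_cases ho : pvOpen (pvGetS tokens i) = true
        · -- an opening bracket: push
          have hid := pv_not_ident_of_open ho
          have hstep := pv_inv_step tokens eq_idx i stack hi (fun h => absurd h (by simp [hc])) hInv
          have hInv' : ∀ d : Nat, wrapArg tokens eq_idx (i + 1 - 1) d
              = ((((decide (0 ≤ i - 1) && pvFuncs.contains (pvGetS tokens (i - 1))) :: stack))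
                  ++ pvBaseL tokens eq_idx).getD d false := by
            rw [show i + 1 - 1 = i from by ring]
            intro d
            simpa [hc, ho] using hstep d
          have hdep : (stack.length : Int) + 1
              = (((decide (0 ≤ i - 1) && pvFuncs.contains (pvGetS tokens (i - 1))) :: stack).length : Int) := by
            simp
          simp only [hc, ho, hid, if_true, Bool.false_eq_true, if_false, Bool.false_and,
            List.isEmpty_cons, Bool.and_false,
            show ¬ ((stack.length : Int) + 1 < 0) from by omega, decide_false,
            show decide (((stack.length : Int) + 1) = 0) = false from by
              simp only [decide_eq_false_iff_not]; omega]
          rw [hdep]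
          split_ifs <;>
            first
              | rfl
              | exact ih (i + 1) _ _ _ (by omega) (by omega) hInv'
        · -- not a bracket: depth and stack unchanged
          have hstep := pv_inv_step tokens eq_idx i stack hi (fun h => absurd h (by simp [hc])) hInv
          have hInv' : ∀ d : Nat, wrapArg tokens eq_idx (i + 1 - 1) d
              = (stack ++ pvBaseL tokens eq_idx).getD d false := by
            rw [show i + 1 - 1 = i from by ring]
            intro d
            simpa [hc, ho] using hstep d
          have hWrap0 : wrapArg tokens eq_idx (i - 1) 0
              = stack.headD ((pvBaseL tokens eq_idx).headD false) := by
            rw [hInv 0, pv_getD_append_zero]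
          simp only [hc, ho, Bool.false_eq_true, if_false, Bool.false_and, pv_isEmpty_iff,
            hWrap0]
          split_ifs <;>
            first
              | rfl
              | exact ih (i + 1) stack _ _ (by omega) (by omega) hInv'

lemma pv_base_headD (tokens : List String) (eq_idx : Int) :
    (pvBaseL tokens eq_idx).headD false
      = (pvOpen (pvGetS tokens eq_idx) && decide (0 ≤ eq_idx - 1)
          && pvFuncs.contains (pvGetS tokens (eq_idx - 1))) := by
  unfold pvBaseL
  by_cases h : pvOpen (pvGetS tokens eq_idx) = true <;> simp [h]

-- ===== VERDICT (by name: the statement is the Claim_ definition above) =====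
theorem detect_safe_numeric_assignment_py_spec : Claim_equal_detect_safe_numeric_assignment_py := by
  unfold Claim_equal_detect_safe_numeric_assignment_py
  intro tokens eq_idx known _hdom _hpre
  unfold Spec_detect_safe_numeric_assignment_py
  unfold detect_safe_numeric_assignment_py detect_safe_numeric_assignment_py_alt
  by_cases hlt : eq_idx + 1 < (tokens.length : Int)
  · simp only [hlt, if_pos]
    rw [← pv_base_headD]
    have h0 : ((([] : List Bool).length : Int)) = (0 : Int) := by simp
    rw [← h0]
    exact pv_loop_eq tokens eq_idx known (tokens.length : Int) ((tokens.length : Int) - (eq_idx + 1)).toNat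
      (eq_idx + 1) [] false true rfl (le_refl _)
      (by intro d
          simpa [show eq_idx + 1 - 1 = eq_idx from by ring] using pv_inv_base tokens eq_idx d)
  · simp only [hlt, if_false]
    rw [loopA]
    simp [hlt]
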